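-- pv_equiv track=rewrite | github.com/melodist/CodingPractice | src/KAKAO/2018_BLIND_Shuttle Bus.py | solution
-- ===== SOURCE A (Python) =====
-- from collections import deque, defaultdict
--
-- def convert_to_min(t):
--     h, m = t.split(':')
--     return int(h) * 60 + int(m)
--
-- def convert_to_hour(t):
--     h = "0" + str(t // 60) if t //60 < 10 else str(t // 60)
--     m = "0" + str(t % 60) if t % 60 < 10 else str(t % 60)
--     return h + ":" + m
--
-- def solution(n, t, m, timetable):
--     table = [convert_to_min(t) for t in timetable]
--     table.sort()
--
--     q = deque(table)
--
--     i = 0 # Shuttle No.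
--     shuttle = defaultdict(list)
--
--     while i < n and q:
--         if q[0] <= i * t + 540:
--             shuttle[i+1].append(q.popleft())
--         else:
--             i += 1
--
--         if len(shuttle[i+1]) == m:
--             i += 1
--
--     if len(shuttle[n]) < m:
--         ans = (n-1) * t + 540
--     else:
--         ans = shuttle[n][-1] - 1
--
--     return convert_to_hour(ans)
-- ===== SOURCE B (Python) =====
-- from collections import deque
--
--
-- def convert_to_min(t):
--     h, m = t.split(':')
--     return int(h) * 60 + int(m)
--
--
-- def convert_to_hour(t):
--     h = "0" + str(t // 60) if t // 60 < 10 else str(t // 60)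
--     m = "0" + str(t % 60) if t % 60 < 10 else str(t % 60)
--     return h + ":" + m
--
--
-- def solution(n, t, m, timetable):
--     q = deque(sorted(convert_to_min(x) for x in timetable))
--
--     last = None
--     final_full = False
--     for b in range(n):
--         bustime = 540 + b * t
--         boarded = 0
--         while q and q[0] <= bustime and boarded < m:
--             last = q.popleft()
--             boarded += 1
--         if b == n - 1:
--             final_full = (boarded == m)
--
--     ans = last - 1 if final_full else 540 + (n - 1) * t
--     return convert_to_hour(ans)
-- ===== Notes on version B (the rewrite author's own statement) =====
-- stated objective: simpler
-- what changed: A's single fused while-loop over a shuttle-number counter with a defaultdict of boarded lists and an increment-on-full trick is replaced by an explicit per-bus simulation: an outer for over the n buses with an inner boarding while-loop capped at m, keeping only the last boarded time and whether the final bus filled.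
-- outside the precondition, e.g. on solution(1, 10, 0, ['08:00']): A returns '07:59', B raises TypeError
import Mathlib
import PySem

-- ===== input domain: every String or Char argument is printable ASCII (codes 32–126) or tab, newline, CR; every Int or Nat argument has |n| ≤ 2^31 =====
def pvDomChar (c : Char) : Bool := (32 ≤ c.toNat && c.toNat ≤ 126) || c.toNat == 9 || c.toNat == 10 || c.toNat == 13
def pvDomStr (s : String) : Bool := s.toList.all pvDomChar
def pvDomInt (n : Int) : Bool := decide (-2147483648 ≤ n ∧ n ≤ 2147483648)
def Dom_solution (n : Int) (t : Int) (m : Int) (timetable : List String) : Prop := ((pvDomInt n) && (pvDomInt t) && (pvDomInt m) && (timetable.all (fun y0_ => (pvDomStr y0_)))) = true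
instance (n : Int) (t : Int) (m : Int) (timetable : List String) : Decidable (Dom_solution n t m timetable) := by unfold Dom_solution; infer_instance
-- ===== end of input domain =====

-- B replaces A's fused while-loop (shuttle counter + defaultdict + increment-on-full trick) by an
-- explicit per-bus simulation (outer loop over the n buses, inner boarding loop); objective: simpler.

-- ===== PORT A =====
-- convert_to_min: h, m = t.split(':'); int(h)*60 + int(m).  none = ValueError / unpacking error.
def convertToMin? (s : String) : Option Int :=
  match PySem.Str.split? s ":" with
  | some [h, mm] =>
    match PySem.Int.ofStr? h, PySem.Int.ofStr? mm with
    | some hv, some mv => some (hv * 60 + mv)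
    | _, _ => none
  | _ => none

-- convert_to_hour (this helper is verbatim identical in both Python versions, so it is shared)
def convertToHour (t : Int) : String :=
  let h := if PySem.Int.floordiv t 60 < 10 then "0" ++ PySem.Int.toStr (PySem.Int.floordiv t 60) else PySem.Int.toStr (PySem.Int.floordiv t 60)
  let m := if PySem.Int.mod t 60 < 10 then "0" ++ PySem.Int.toStr (PySem.Int.mod t 60) else PySem.Int.toStr (PySem.Int.mod t 60)
  h ++ ":" ++ m

-- the while-loop of A, state (i, q, shuttle)
def loopA (n t m : Int) (i : Int) (q : List Int) (shuttle : PySem.Dict Int (List Int)) : PySem.Dict Int (List Int) :=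
  if _hn : i < n then
    match q with
    | [] => shuttle
    | x :: rest =>
      if x ≤ i * t + 540 then
        -- shuttle[i+1].append(q.popleft())
        let sh₁ := shuttle.insert (i+1) (shuttle.getD (i+1) [] ++ [x])
        if ((sh₁.getD (i+1) []).length : Int) = m then loopA n t m (i+1) rest sh₁
        else loopA n t m i rest sh₁
      else
        -- i += 1, then the len(shuttle[i+1]) == m check with the incremented i
        if ((shuttle.getD (i+2) []).length : Int) = m then loopA n t m (i+2) (x :: rest) shuttle
        else loopA n t m (i+1) (x :: rest) shuttle
  else shuttle
termination_by (q.length + (n - i).toNat)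
decreasing_by all_goals (simp_all; try omega)

def solution (n : Int) (t : Int) (m : Int) (timetable : List String) : String :=
  match timetable.mapM convertToMin? with
  | none => ""   -- convert_to_min raised; excluded by Pre_solution
  | some table =>
    let q := PySem.List.sorted table (fun x => x)
    let shuttleF := loopA n t m 0 q PySem.Dict.empty
    let sn := shuttleF.getD n []
    let ans :=
      if ((sn.length : Int)) < m then (n - 1) * t + 540
      else
        match PySem.List.pyGet? sn (-1) with
        | some l => l - 1
        | none => 0   -- shuttle[n][-1] IndexError (only reachable with m ≤ 0); excluded by Pre_solution
    convertToHour ans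

-- ===== PORT B =====
-- the inner while-loop of B: while q and q[0] <= bustime and boarded < m
def boardB (time m : Int) : List Int → Int → Option Int → List Int × Int × Option Int
  | [], boarded, last => ([], boarded, last)
  | x :: rest, boarded, last =>
    if x ≤ time ∧ boarded < m then boardB time m rest (boarded + 1) (some x)
    else (x :: rest, boarded, last)

-- one iteration of B's for-loop over bus indices b; state (q, last, final_full)
def stepB (n t m : Int) (st : List Int × Option Int × Bool) (b : Int) : List Int × Option Int × Bool :=
  let r := boardB (540 + b * t) m st.1 0 st.2.1
  (r.1, r.2.2, if b = n - 1 then decide (r.2.1 = m) else st.2.2)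

def solution_alt (n : Int) (t : Int) (m : Int) (timetable : List String) : String :=
  match timetable.mapM convertToMin? with
  | none => ""   -- convert_to_min raised; excluded by Pre_solution
  | some table =>
    let q := PySem.List.sorted table (fun x => x)
    let r := (PySem.List.pyRange 0 n 1).foldl (stepB n t m) (q, none, false)
    let ans := if r.2.2 then r.2.1.getD 0 - 1 else 540 + (n - 1) * t   -- last is always set when final_full (m ≥ 1)
    convertToHour ans

-- ===== PRECONDITION & SPEC =====
def validTime (s : String) : Bool :=
  match PySem.Str.split? s ":" with
  | some [h, mm] => (PySem.Int.ofStr? h).isSome && (PySem.Int.ofStr? mm).isSome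
  | _ => false

-- Pre_ excludes (a) timetable entries on which convert_to_min raises ValueError, and (b) m ≤ 0
-- (a nonsensical bus capacity): there A's `len == m` check misfires and boards past capacity, so A
-- either raises IndexError (shuttle[n][-1] on an empty list) or returns an accidental value,
-- while B naturally raises TypeError (None - 1).
def Pre_solution (n : Int) (t : Int) (m : Int) (timetable : List String) : Prop :=
  1 ≤ m ∧ ∀ s ∈ timetable, validTime s = true

instance (n : Int) (t : Int) (m : Int) (timetable : List String) : Decidable (Pre_solution n t m timetable) := by unfold Pre_solution; infer_instance

def pvWitness_solution : Int × Int × Int × List String := (2, 10, 2, ["08:00", "08:01", "09:10"])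

def Spec_solution (n : Int) (t : Int) (m : Int) (timetable : List String) (out : String) : Prop := out = solution_alt n t m timetable
instance (n : Int) (t : Int) (m : Int) (timetable : List String) (out : String) : Decidable (Spec_solution n t m timetable out) := by unfold Spec_solution; infer_instance

-- ===== CLAIM (what is proved, stated in full; the proofs are below) =====
def Claim_equal_solution : Prop := ∀ (n : Int) (t : Int) (m : Int) (timetable : List String), Dom_solution n t m timetable → Pre_solution n t m timetable → Spec_solution n t m timetable (solution n t m timetable)

-- ===== LEMMAS AND PROOFS =====

-- reference boarding of one bus: (passengers taken in order, remaining queue), starting from a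
-- count c of already-boarded passengers, capacity m
def takeBus (time m : Int) (c : Int) : List Int → List Int × List Int
  | [] => ([], [])
  | x :: rest =>
    if x ≤ time ∧ c < m then
      let r := takeBus time m (c + 1) rest
      (x :: r.1, r.2)
    else ([], x :: rest)

-- passenger list of the FINAL bus when buses i, i+1, …, i+k-1 board fresh in sequence
def busFinal (t m : Int) : Nat → Int → List Int → List Int
  | 0, _, _ => []
  | 1, i, q => (takeBus (i * t + 540) m 0 q).1
  | Nat.succ (Nat.succ k), i, q => busFinal t m (Nat.succ k) (i + 1) (takeBus (i * t + 540) m 0 q).2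

theorem getLast?_or_cons (r : List Int) (x : Int) (l : Option Int) :
    (x :: r).getLast?.or l = r.getLast?.or (some x) := by
  cases r with
  | nil => simp
  | cons y ys =>
    rw [List.getLast?_cons_cons]
    have h : (y :: ys).getLast?.isSome := by simp [List.getLast?_isSome]
    rw [Option.or_of_isSome h, Option.or_of_isSome h]

-- B's inner while-loop, characterised through takeBus
theorem boardB_eq (time m : Int) : ∀ (q : List Int) (c : Int) (l : Option Int),
    boardB time m q c l =
      ((takeBus time m c q).2, c + ((takeBus time m c q).1.length : Int),
       (takeBus time m c q).1.getLast?.or l) := by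
  intro q
  induction q with
  | nil => intro c l; simp [boardB, takeBus]
  | cons x rest ih =>
    intro c l
    by_cases h : x ≤ time ∧ c < m
    · simp only [boardB, takeBus, if_pos h]
      rw [ih (c+1) (some x)]
      refine Prod.ext rfl (Prod.ext ?_ ?_)
      · push_cast [List.length_cons]; omega
      · exact (getLast?_or_cons _ x l).symm
    · simp [boardB, takeBus, if_neg h]

theorem takeBus_len (time m : Int) : ∀ (q : List Int) (c : Int), c ≤ m →
    c + (((takeBus time m c q).1.length : Int)) ≤ m := by
  intro q
  induction q with
  | nil => intro c h; simpa [takeBus]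
  | cons x rest ih =>
    intro c h
    by_cases hx : x ≤ time ∧ c < m
    · have := ih (c+1) (by omega)
      simp only [takeBus, if_pos hx, List.length_cons] at *
      push_cast at *; omega
    · simp [takeBus, if_neg hx]; omega

theorem busFinal_len (t m : Int) (hm : 0 ≤ m) : ∀ (k : Nat) (i : Int) (q : List Int),
    ((busFinal t m k i q).length : Int) ≤ m := by
  intro k
  induction k with
  | zero => intro i q; simpa [busFinal]
  | succ k ih =>
    intro i q
    cases k with
    | zero =>
      have := takeBus_len (i * t + 540) m q 0 hm
      simpa [busFinal] using this
    | succ k' => simpa [busFinal] using ih (i+1) (takeBus (i * t + 540) m 0 q).2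

theorem convertToMin?_isSome (s : String) (h : validTime s = true) : (convertToMin? s).isSome := by
  unfold validTime at h
  unfold convertToMin?
  split at h
  · rcases Option.isSome_iff_exists.mp (by exact (Bool.and_eq_true _ _ ▸ h).1) with ⟨a, ha⟩
    rcases Option.isSome_iff_exists.mp (by exact (Bool.and_eq_true _ _ ▸ h).2) with ⟨b, hb⟩
    simp [ha, hb]
  · exact absurd h (by simp)

theorem mapM_some_of_valid : ∀ (l : List String), (∀ s ∈ l, validTime s = true) →
    ∃ table, l.mapM convertToMin? = some table := by
  intro l
  induction l with
  | nil => intro _; exact ⟨[], rfl⟩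
  | cons s rest ih =>
    intro h
    rcases ih (fun x hx => h x (List.mem_cons_of_mem _ hx)) with ⟨tb, htb⟩
    rcases Option.isSome_iff_exists.mp (convertToMin?_isSome s (h s List.mem_cons_self)) with ⟨v, hv⟩
    exact ⟨v :: tb, by simp [List.mapM_cons, hv, htb]⟩

theorem loopA_nil (n t m i : Int) (sh : PySem.Dict Int (List Int)) : loopA n t m i [] sh = sh := by
  unfold loopA; split <;> rfl

theorem loopA_stop (n t m i : Int) (q : List Int) (sh : PySem.Dict Int (List Int)) (h : ¬ i < n) :
    loopA n t m i q sh = sh := by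
  rw [loopA.eq_def, dif_neg h]

theorem getD_empty_list (j : Int) : (PySem.Dict.empty : PySem.Dict Int (List Int)).getD j [] = [] := by
  simp [PySem.Dict.getD, PySem.Dict.get?, PySem.Dict.empty]

-- one full bus of A's while-loop equals a takeBus step
theorem busStepA (n t m : Int) (hm : 1 ≤ m) : ∀ (q : List Int) (i : Int) (shuttle : PySem.Dict Int (List Int)),
    i < n → ((shuttle.getD (i+1) []).length : Int) < m →
    (∀ j, i + 1 < j → shuttle.getD j [] = []) →
    loopA n t m i q shuttle =
      loopA n t m (i+1) (takeBus (i * t + 540) m ((shuttle.getD (i+1) []).length : Int) q).2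
        (if (takeBus (i * t + 540) m ((shuttle.getD (i+1) []).length : Int) q).1 = [] then shuttle
         else shuttle.insert (i+1) (shuttle.getD (i+1) [] ++ (takeBus (i * t + 540) m ((shuttle.getD (i+1) []).length : Int) q).1)) := by
  intro q
  induction q with
  | nil =>
    intro i sh hi hc hf
    simp [takeBus, loopA_nil]
  | cons x rest ih =>
    intro i sh hi hc hf
    by_cases hx : x ≤ i * t + 540
    · have hcond : x ≤ i * t + 540 ∧ ((sh.getD (i+1) []).length : Int) < m := ⟨hx, hc⟩
      simp only [takeBus, if_pos hcond]
      conv_lhs => rw [loopA]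
      simp only [dif_pos hi, if_pos hx, PySem.Dict.getD_insert_self]
      have hlen : (((sh.getD (i+1) [] ++ [x]).length : Int)) = ((sh.getD (i+1) []).length : Int) + 1 := by
        simp
      rw [hlen]
      by_cases hfull : ((sh.getD (i+1) []).length : Int) + 1 = m
      · rw [if_pos hfull]
        have hstop : takeBus (i * t + 540) m (((sh.getD (i+1) []).length : Int) + 1) rest = ([], rest) := by
          cases rest with
          | nil => rfl
          | cons y ys =>
            rw [takeBus, if_neg]
            rintro ⟨-, h2⟩
            omega
        rw [hstop]
        simp
      · rw [if_neg hfull]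
        have hc' : (((sh.insert (i+1) (sh.getD (i+1) [] ++ [x])).getD (i+1) []).length : Int) < m := by
          rw [PySem.Dict.getD_insert_self, hlen]
          omega
        have hf' : ∀ j, i + 1 < j → (sh.insert (i+1) (sh.getD (i+1) [] ++ [x])).getD j [] = [] := by
          intro j hj
          rw [PySem.Dict.getD_insert_of_ne _ _ _ (by omega)]
          exact hf j hj
        rw [ih i _ hi hc' hf']
        simp only [PySem.Dict.getD_insert_self, hlen]
        congr 1
        by_cases hr : (takeBus (i * t + 540) m (((sh.getD (i+1) []).length : Int) + 1) rest).1 = []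
        · rw [if_pos hr, if_neg (by simp), hr]
        · rw [if_neg hr, if_neg (by simp), PySem.Dict.insert_insert_self]
          simp
    · have hcond : ¬ (x ≤ i * t + 540 ∧ ((sh.getD (i+1) []).length : Int) < m) := by tauto
      simp only [takeBus, if_neg hcond]
      conv_lhs => rw [loopA]
      simp only [dif_pos hi, if_neg hx]
      rw [hf (i+2) (by omega)]
      rw [if_neg (by simp; omega)]
      simp

-- A's whole loop: the final bus's passenger list is busFinal
theorem chainA (n t m : Int) (hm : 1 ≤ m) : ∀ (k : Nat) (i : Int) (q : List Int) (shuttle : PySem.Dict Int (List Int)),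
    (n - i).toNat = k → 0 < k →
    (∀ j, i < j → shuttle.getD j [] = []) →
    (loopA n t m i q shuttle).getD n [] = busFinal t m k i q := by
  intro k
  induction k with
  | zero => intro i q sh hk hpos hf; omega
  | succ k ih =>
    intro i q sh hk hpos hf
    have hi : i < n := by omega
    have hc : ((sh.getD (i+1) []).length : Int) < m := by
      rw [hf (i+1) (by omega)]; simpa using by omega
    rw [busStepA n t m hm q i sh hi hc (fun j hj => hf j (by omega))]
    rw [hf (i+1) (by omega)]
    simp only [List.length_nil, Nat.cast_zero, List.nil_append]
    cases k with
    | zero =>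
      have hn : n = i + 1 := by omega
      rw [loopA_stop _ _ _ _ _ _ (by omega)]
      subst hn
      by_cases hr : (takeBus (i * t + 540) m 0 q).1 = []
      · rw [if_pos hr, hf (i+1) (by omega), busFinal, hr]
      · rw [if_neg hr, PySem.Dict.getD_insert_self, busFinal]
    | succ k' =>
      have hrec := ih (i+1) (takeBus (i * t + 540) m 0 q).2
        (if (takeBus (i * t + 540) m 0 q).1 = [] then sh
         else sh.insert (i+1) (takeBus (i * t + 540) m 0 q).1)
        (by omega) (by omega)
        (by
          intro j hj
          by_cases hr : (takeBus (i * t + 540) m 0 q).1 = []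
          · rw [if_pos hr]; exact hf j (by omega)
          · rw [if_neg hr, PySem.Dict.getD_insert_of_ne _ _ _ (by omega)]
            exact hf j (by omega))
      rw [hrec, busFinal]

-- B's for-loop: final_full and (when full) last, characterised through busFinal
theorem foldB (n t m : Int) (hm : 1 ≤ m) : ∀ (k : Nat) (i : Int) (q : List Int) (l : Option Int),
    (n - i).toNat = k → 0 < k →
    ((PySem.List.pyRange i n 1).foldl (stepB n t m) (q, l, false)).2.2
        = decide (((busFinal t m k i q).length : Int) = m) ∧
    (((busFinal t m k i q).length : Int) = m →
      ((PySem.List.pyRange i n 1).foldl (stepB n t m) (q, l, false)).2.1 = (busFinal t m k i q).getLast?) := by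
  intro k
  induction k with
  | zero => intro i q l hk hpos; omega
  | succ k ih =>
    intro i q l hk hpos
    have hi : i < n := by omega
    rw [PySem.List.pyRange_one_cons hi, List.foldl_cons]
    have ht : 540 + i * t = i * t + 540 := by ring
    cases k with
    | zero =>
      have hn : n = i + 1 := by omega
      rw [hn, PySem.List.pyRange_one_eq_nil (by omega), List.foldl_nil]
      simp only [stepB, boardB_eq, ht]
      rw [if_pos (by omega)]
      constructor
      · simp [busFinal]
      · intro hfull
        rw [busFinal] at hfull ⊢
        have hne : (takeBus (i * t + 540) m 0 q).1 ≠ [] := by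
          intro h0; rw [h0] at hfull; simp at hfull; omega
        exact Option.or_of_isSome (by simp [List.getLast?_isSome, hne])
    | succ k' =>
      simp only [stepB, boardB_eq, ht]
      rw [if_neg (by omega)]
      have hrec := ih (i+1) (takeBus (i * t + 540) m 0 q).2
        ((takeBus (i * t + 540) m 0 q).1.getLast?.or l) (by omega) (by omega)
      rw [busFinal]
      exact hrec

theorem solution_eq_alt (n t m : Int) (timetable : List String)
    (hm : 1 ≤ m) (hv : ∀ s ∈ timetable, validTime s = true) :
    solution n t m timetable = solution_alt n t m timetable := by
  obtain ⟨table, htable⟩ := mapM_some_of_valid timetable hv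
  unfold solution solution_alt
  rw [htable]
  simp only []
  apply congrArg
  by_cases hn0 : n ≤ 0
  · rw [loopA_stop _ _ _ _ _ _ (by omega), getD_empty_list]
    rw [PySem.List.pyRange_one_eq_nil (by omega), List.foldl_nil]
    rw [if_pos (by simpa using by omega)]
    simp only [Bool.false_eq_true, if_false]
    ring
  · have hA := chainA n t m hm n.toNat 0 (PySem.List.sorted table (fun x => x)) PySem.Dict.empty
      (by omega) (by omega) (fun j _ => getD_empty_list j)
    have hB := foldB n t m hm n.toNat 0 (PySem.List.sorted table (fun x => x)) none (by omega) (by omega)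
    rw [hA, hB.1]
    by_cases hfull : (((busFinal t m n.toNat 0 (PySem.List.sorted table (fun x => x))).length : Int)) = m
    · rw [if_neg (by omega), if_pos (by simpa using hfull)]
      have hne : busFinal t m n.toNat 0 (PySem.List.sorted table (fun x => x)) ≠ [] := by
        intro h0; rw [h0] at hfull; simp at hfull; omega
      rw [PySem.List.pyGet?_neg_one, hB.2 hfull]
      obtain ⟨z, hz⟩ := Option.isSome_iff_exists.mp
        (by simp [List.getLast?_isSome, hne] :
          (busFinal t m n.toNat 0 (PySem.List.sorted table (fun x => x))).getLast?.isSome)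
      rw [hz]
      rfl
    · have hle := busFinal_len t m (by omega) n.toNat 0 (PySem.List.sorted table (fun x => x))
      rw [if_pos (by omega), if_neg (by simpa using hfull)]
      ring

-- ===== VERDICT (by name: the statement is the Claim_ definition above) =====
theorem solution_spec : Claim_equal_solution := by
  intro n t m timetable _ hpre
  unfold Spec_solution
  exact solution_eq_alt n t m timetable hpre.1 hpre.2
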